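-- pv_equiv track=rewrite | github.com/joaabjb/ifpi-ads-algoritmos2020 | URI/uri_1024_criptografia.py | passo_3
-- ===== SOURCE A (Python) =====
-- from math import trunc
--
-- def desloca_caracter(caracter, n): #Desloca um caractere de n posições na tabela ASCII
--     nova_ord = ord(caracter) + n
--     novo_caracter = chr(nova_ord)
--     return novo_caracter
--
-- def passo_3(mensagem): #Desloca os caracteres, a partir da metade de mensagem, de -1 na tabela ASCII
--     nova_mensagem = ''
--     n = trunc(len(mensagem) / 2)
--     for c in range(len(mensagem)):
--         if c >= n:
--             nova_mensagem += desloca_caracter(mensagem[c], -1)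
--         else:
--             nova_mensagem += mensagem[c]
--     return nova_mensagem
-- ===== SOURCE B (Python) =====
-- def passo_3(mensagem):
--     n = len(mensagem) // 2
--     return mensagem[:n] + ''.join(chr(ord(c) - 1) for c in mensagem[n:])
-- ===== Notes on version B (the rewrite author's own statement) =====
-- stated objective: simpler
-- what changed: Replaces the per-index loop with an if/else branch by a slice split: unchanged head slice plus one join-of-map over the tail, eliminating the branch, the index bookkeeping and the repeated string concatenation.
import Mathlib
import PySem

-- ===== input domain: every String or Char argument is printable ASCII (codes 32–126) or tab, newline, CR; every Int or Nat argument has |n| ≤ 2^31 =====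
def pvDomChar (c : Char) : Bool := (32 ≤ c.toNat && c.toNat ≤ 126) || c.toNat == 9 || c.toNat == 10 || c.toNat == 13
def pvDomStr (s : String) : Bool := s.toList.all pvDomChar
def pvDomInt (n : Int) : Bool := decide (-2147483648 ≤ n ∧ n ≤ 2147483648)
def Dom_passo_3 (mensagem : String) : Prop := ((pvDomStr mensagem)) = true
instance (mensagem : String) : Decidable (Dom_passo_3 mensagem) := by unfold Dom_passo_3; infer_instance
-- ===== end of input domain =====

-- B replaces A's indexed loop with its if/else branch by a slice split (unchanged head, mapped tail); objective: simpler.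

-- ===== PORT A =====
-- helper: desloca_caracter(caracter, -1) = chr(ord(caracter) - 1); exact on Dom (codes ≥ 9, no underflow)
def desloca_caracter (caracter : Char) (n : Int) : Char :=
  Char.ofNat ((caracter.toNat : Int) + n).toNat

def passo_3 (mensagem : String) : String :=
  let l := mensagem.toList
  -- n = trunc(len(mensagem) / 2): len is a nonnegative int, so this is Nat division (float exact below 2^53)
  let n : Nat := l.length / 2
  let nova : List Char := (List.range l.length).foldl
    (fun acc c => if c ≥ n then acc ++ [desloca_caracter l[c]! (-1)] else acc ++ [l[c]!]) []
  String.ofList nova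

-- ===== PORT B =====
def passo_3_alt (mensagem : String) : String :=
  let l := mensagem.toList
  let n : Nat := l.length / 2
  String.ofList (l.take n ++ (l.drop n).map (fun c => Char.ofNat (c.toNat - 1)))

-- ===== PRECONDITION & SPEC =====
def Spec_passo_3 (mensagem : String) (out : String) : Prop := out = passo_3_alt mensagem
instance (mensagem : String) (out : String) : Decidable (Spec_passo_3 mensagem out) := by unfold Spec_passo_3; infer_instance

-- ===== CLAIM (what is proved, stated in full; the proofs are below) =====
def Claim_equal_passo_3 : Prop := ∀ (mensagem : String), Dom_passo_3 mensagem → Spec_passo_3 mensagem (passo_3 mensagem)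

-- ===== LEMMAS AND PROOFS =====

theorem foldl_append_singleton {α β : Type} (g : α → β) :
    ∀ (xs : List α) (acc : List β),
      xs.foldl (fun a c => a ++ [g c]) acc = acc ++ xs.map g := by
  intro xs
  induction xs with
  | nil => simp
  | cons x xs ih => intro acc; simp [List.foldl, ih]

theorem shift_eq (c : Char) (h : 9 ≤ c.toNat) :
    desloca_caracter c (-1) = Char.ofNat (c.toNat - 1) := by
  simp only [desloca_caracter]
  congr 1
  omega

-- ===== VERDICT (by name: the statement is the Claim_ definition above) =====
theorem passo_3_spec : Claim_equal_passo_3 := by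
  intro m hdom
  unfold Spec_passo_3 passo_3 passo_3_alt
  simp only []
  set l := m.toList with hl
  set n : Nat := l.length / 2 with hn
  have hnle : n ≤ l.length := Nat.div_le_self _ _
  have hall : ∀ c ∈ l, 9 ≤ c.toNat := by
    intro c hc
    have := List.all_eq_true.mp hdom c hc
    simp [pvDomChar] at this
    omega
  congr 1
  have hfun : (fun (acc : List Char) (c : Nat) =>
      if c ≥ n then acc ++ [desloca_caracter l[c]! (-1)] else acc ++ [l[c]!])
      = fun acc c => acc ++ [if c ≥ n then desloca_caracter l[c]! (-1) else l[c]!] := by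
    funext acc c; split_ifs <;> rfl
  rw [hfun, foldl_append_singleton]
  simp only [List.nil_append]
  apply List.ext_getElem
  · simp; omega
  · intro i h1 h2
    have hiL : i < l.length := by simpa using h1
    rw [List.getElem_map, List.getElem_range]
    have hget : l[i]! = l[i] := getElem!_pos l i hiL
    by_cases hin : i < n
    · rw [List.getElem_append_left (by simpa [Nat.min_eq_left hnle] using hin)]
      simp [hget, Nat.not_le.mpr hin, List.getElem_take]
    · have hni : n ≤ i := Nat.le_of_not_lt hin
      rw [List.getElem_append_right (by simpa [Nat.min_eq_left hnle] using hni)]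
      simp only [List.length_take, Nat.min_eq_left hnle, List.getElem_map, List.getElem_drop]
      rw [if_pos hni, hget, shift_eq _ (hall _ (l.getElem_mem hiL))]
      simp [Nat.add_sub_cancel' hni]
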